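-- pv_equiv track=rewrite | github.com/Joedmo15/Continental | main.py | straight_check
-- ===== SOURCE A (Python) =====
-- def straight_check(list, run_count=1):
--     list.sort()
--     if len(list) == 1:
--         if run_count == 4:
--             return True
--         else:
--             return False
--     elif run_count == 4:
--         return True
--     elif list[0] + 1 == list[1]:
--         return straight_check(list[1:], run_count + 1)
--     else:
--         return straight_check(list[1:], 1)
-- ===== SOURCE B (Python) =====
-- def straight_check(list, run_count=1):
--     # sorts list in place, like A
--     list.sort()
--     r = run_count
--     for a, b in zip(list, list[1:]):
--         if r == 4:
--             return True
--         r = r + 1 if a + 1 == b else 1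
--     return r == 4
-- ===== Notes on version B (the rewrite author's own statement) =====
-- stated objective: faster
-- what changed: Replace A's recursion that re-sorts and re-slices the list at every step with one sort followed by a single linear pass over adjacent pairs tracking the run counter.
-- outside the precondition, e.g. on straight_check([], 1): A raises IndexError, B returns False
import Mathlib
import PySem

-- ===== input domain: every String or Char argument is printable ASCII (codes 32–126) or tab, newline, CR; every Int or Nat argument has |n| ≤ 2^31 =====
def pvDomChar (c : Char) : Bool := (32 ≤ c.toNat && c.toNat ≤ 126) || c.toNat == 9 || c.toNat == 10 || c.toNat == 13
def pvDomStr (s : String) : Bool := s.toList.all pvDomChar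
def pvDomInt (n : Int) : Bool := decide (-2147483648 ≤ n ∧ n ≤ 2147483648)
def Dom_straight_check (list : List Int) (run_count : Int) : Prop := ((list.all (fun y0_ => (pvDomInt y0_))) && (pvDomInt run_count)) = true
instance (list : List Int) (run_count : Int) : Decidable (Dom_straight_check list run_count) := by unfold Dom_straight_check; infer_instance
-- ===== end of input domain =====

-- B: one sort + one linear pass over adjacent pairs instead of A's recursion that
-- re-sorts/re-slices at each step (faster); both sort the list in place — the
-- equivalence proved here is about the return value only.

-- ===== PORT A =====
-- Literal port of A: sort, then the four-way branch; the recursive calls take the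
-- tail (list[1:]) of the sorted list.  On the empty list with run_count ≠ 4 Python
-- raises IndexError at list[1] — that input is outside Pre_ and the port returns
-- false there (the `| []` arm).
def straight_check (list : List Int) (run_count : Int) : Bool :=
  let l := PySem.List.sorted list (fun x => x)
  if l.length = 1 then
    decide (run_count = 4)
  else if run_count = 4 then
    true
  else
    match h : l with
    | [] => false          -- Python raises IndexError here (excluded by Pre_)
    | [_] => false         -- unreachable: l.length ≠ 1
    | a :: b :: rest =>
        if a + 1 = b then straight_check (b :: rest) (run_count + 1)
        else straight_check (b :: rest) 1
termination_by list.length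
decreasing_by
  all_goals
    have hl : l.length = list.length := PySem.List.length_sorted ..
    rw [h] at hl
    simp only [List.length_cons] at hl ⊢
    omega

-- ===== PORT B =====
-- the for-loop of Source B over zip(list, list[1:]) with its early return
def scAltLoop (pairs : List (Int × Int)) (r : Int) : Bool :=
  match pairs with
  | [] => decide (r = 4)
  | (a, b) :: rest =>
      if r = 4 then true
      else scAltLoop rest (if a + 1 = b then r + 1 else 1)

def straight_check_alt (list : List Int) (run_count : Int) : Bool :=
  let l := PySem.List.sorted list (fun x => x)
  scAltLoop (l.zip (PySem.List.slice l (some 1) none)) run_count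

-- ===== PRECONDITION & SPEC =====
-- Pre_ excludes exactly the inputs where A raises IndexError: the empty list with
-- run_count ≠ 4.
def Pre_straight_check (list : List Int) (run_count : Int) : Prop :=
  list ≠ [] ∨ run_count = 4
instance (list : List Int) (run_count : Int) : Decidable (Pre_straight_check list run_count) := by
  unfold Pre_straight_check; infer_instance

def pvWitness_straight_check : List Int × Int := ([3, 1, 2, 4], 1)

def Spec_straight_check (list : List Int) (run_count : Int) (out : Bool) : Prop := out = straight_check_alt list run_count
instance (list : List Int) (run_count : Int) (out : Bool) : Decidable (Spec_straight_check list run_count out) := by unfold Spec_straight_check; infer_instance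

-- ===== CLAIM (what is proved, stated in full; the proofs are below) =====
def Claim_equal_straight_check : Prop := ∀ (list : List Int) (run_count : Int), Dom_straight_check list run_count → Pre_straight_check list run_count → Spec_straight_check list run_count (straight_check list run_count)

-- ===== LEMMAS AND PROOFS =====

-- On an already-sorted nonempty list (or run_count = 4), A's recursion equals B's
-- single pass over adjacent pairs.
theorem sc_sorted_eq (l : List Int) (r : Int)
    (hs : l.Pairwise (· ≤ ·)) (hne : l ≠ [] ∨ r = 4) :
    straight_check l r = scAltLoop (l.zip (PySem.List.slice l (some 1) none)) r := by
  induction l generalizing r with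
  | nil =>
      rcases hne with h | h
      · exact absurd rfl h
      · subst h; simp [straight_check, scAltLoop, PySem.List.sorted]
  | cons a t ih =>
      have hself : PySem.List.sorted (a :: t) (fun x => x) false = a :: t :=
        PySem.List.sorted_eq_self_of_pairwise _ _ hs
      cases t with
      | nil =>
          rw [straight_check]
          simp [hself, scAltLoop, PySem.List.slice_from_one]
      | cons b rest =>
          rw [straight_check]
          rw [hself]
          have hs' : (b :: rest).Pairwise (· ≤ ·) := hs.tail
          have hslice : PySem.List.slice (a :: b :: rest) (some 1) none = b :: rest := by
            simp [PySem.List.slice_from_one]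
          have hslice' : PySem.List.slice (b :: rest) (some 1) none = rest := by
            simp [PySem.List.slice_from_one]
          rw [hslice]
          by_cases hr : r = 4
      -- run_count = 4: both sides return true on a length ≥ 2 list
          · simp [hr, scAltLoop]
          · simp only [List.length_cons]
            have hlen : ¬ (rest.length + 1 + 1 = 1) := by omega
            rw [if_neg hlen, if_neg hr]
            have hzip : (a :: b :: rest).zip (b :: rest) = (a, b) :: (b :: rest).zip rest := by
              simp
            rw [hzip]
            simp only [scAltLoop, if_neg hr]
            by_cases hab : a + 1 = b
            · rw [if_pos hab, if_pos hab, ih (r + 1) hs' (Or.inl (by simp)), hslice']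
            · rw [if_neg hab, if_neg hab, ih 1 hs' (Or.inl (by simp)), hslice']

theorem straight_check_spec : Claim_equal_straight_check := by
  intro list run_count _ hpre
  unfold Spec_straight_check straight_check_alt
  have hs : (PySem.List.sorted list (fun x => x)).Pairwise (· ≤ ·) := by
    simpa using PySem.List.sorted_pairwise list (fun x => x)
  have hne : PySem.List.sorted list (fun x => x) ≠ [] ∨ run_count = 4 := by
    rcases hpre with h | h
    · exact Or.inl (by simp [PySem.List.sorted_eq_nil_iff]; exact h)
    · exact Or.inr h
  -- A on `list` = A on the sorted list (A sorts first; sorting is idempotent)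
  have hA : straight_check list run_count
      = straight_check (PySem.List.sorted list (fun x => x)) run_count := by
    conv_rhs => rw [straight_check]
    rw [straight_check]
    rw [PySem.List.sorted_sorted]
  rw [hA]
  exact sc_sorted_eq _ _ hs hne
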